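-- pv_equiv track=rewrite | github.com/nicolasenciso/PCAhttp | featureExtractionM.py | wordSearcher
-- ===== SOURCE A (Python) =====
-- def wordSearcher(word,url):
--     firstLetter = word[0]
--     lastLetter = word[len(word)-1]
--     count = 0
--     i = 0
--     for character in url:
--         if url[i] == firstLetter:
--             newIndex = i+(len(word)-1)
--             if newIndex <= (len(url)-1):
--                 if url[newIndex] == lastLetter:
--                     count += 1
--         i += 1
--     return count
-- ===== SOURCE B (Python) =====
-- def wordSearcher(word, url):
--     # Set-based: intersect the (shifted) occurrence-index sets of the two letters.
--     d = len(word) - 1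
--     first, last = word[0], word[-1]
--     starts = {i + d for i, c in enumerate(url) if c == first}
--     ends = {j for j, c in enumerate(url) if c == last}
--     return len(starts & ends)
-- ===== Notes on version B (the rewrite author's own statement) =====
-- stated objective: alternative
-- what changed: Replaces A's indexed scan with explicit bounds check by building two occurrence-index sets (first-letter positions shifted by len(word)-1, and last-letter positions) and returning the size of their intersection; set membership replaces index arithmetic and the bounds guard.
-- outside the precondition, e.g. on wordSearcher('', 'abc'): A raises IndexError, B raises IndexError
import Mathlib
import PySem

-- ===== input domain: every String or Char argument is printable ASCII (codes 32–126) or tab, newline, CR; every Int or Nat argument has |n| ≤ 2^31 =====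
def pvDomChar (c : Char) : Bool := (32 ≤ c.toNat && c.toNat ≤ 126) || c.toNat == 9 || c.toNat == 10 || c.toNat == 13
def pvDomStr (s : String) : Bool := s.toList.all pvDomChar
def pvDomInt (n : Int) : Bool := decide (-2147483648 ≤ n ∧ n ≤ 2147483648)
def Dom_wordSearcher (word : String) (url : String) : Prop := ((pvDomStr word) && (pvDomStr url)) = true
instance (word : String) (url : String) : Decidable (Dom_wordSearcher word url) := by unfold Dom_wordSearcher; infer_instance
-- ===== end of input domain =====

-- B replaces A's indexed scan with an explicit bounds check by intersecting two
-- occurrence-index sets (first-letter positions shifted by len(word)-1 vs last-letter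
-- positions); alternative algorithm, same O(n) cost. Neither version mutates its arguments.

-- ===== PORT A =====
-- loop body of A: state is (count, i); the element itself is ignored (A reads url by index)
def pvABody (w u : List Char) (firstLetter lastLetter : Char) (st : Int × Int) (_ : Char) : Int × Int :=
  let count := st.1
  let i := st.2
  let count :=
    if PySem.List.pyGetD u i ' ' = firstLetter then
      let newIndex := i + (PySem.List.len w - 1)
      if newIndex ≤ PySem.List.len u - 1 then
        if PySem.List.pyGetD u newIndex ' ' = lastLetter then count + 1 else count
      else count
    else count
  (count, i + 1)

def wordSearcher (word : String) (url : String) : Int :=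
  let w := word.toList
  let u := url.toList
  match PySem.List.pyGet? w 0, PySem.List.pyGet? w (PySem.List.len w - 1) with
  | some firstLetter, some lastLetter =>
      (u.foldl (pvABody w u firstLetter lastLetter) (0, 0)).1
  | _, _ => 0  -- dead branch: Python raises IndexError here; excluded by Pre_

-- ===== PORT B =====
def wordSearcher_alt (word : String) (url : String) : Int :=
  let w := word.toList
  let u := url.toList
  let d := PySem.List.len w - 1
  match PySem.List.pyGet? w 0 with
  | none => 0  -- dead branch: Python raises IndexError here; excluded by Pre_
  | some first =>
    match PySem.List.pyGet? w (-1) with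
    | none => 0
    | some last =>
      -- {i + d for i, c in enumerate(url) if c == first}
      let starts : PySem.Set Int := PySem.Set.ofList
        ((PySem.List.enumerate u).filterMap (fun p => if p.2 = first then some (p.1 + d) else none))
      -- {j for j, c in enumerate(url) if c == last}
      let ends : PySem.Set Int := PySem.Set.ofList
        ((PySem.List.enumerate u).filterMap (fun p => if p.2 = last then some p.1 else none))
      PySem.Set.len (PySem.Set.inter starts ends)

-- ===== PRECONDITION & SPEC =====
-- Pre_ excludes only the empty word, on which Python A raises IndexError at word[0].
def Pre_wordSearcher (word : String) (url : String) : Prop := word.toList ≠ []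
instance (word : String) (url : String) : Decidable (Pre_wordSearcher word url) := by
  unfold Pre_wordSearcher; infer_instance
def pvWitness_wordSearcher : String × String := ("ab", "abcab")

def Spec_wordSearcher (word : String) (url : String) (out : Int) : Prop := out = wordSearcher_alt word url
instance (word : String) (url : String) (out : Int) : Decidable (Spec_wordSearcher word url out) := by unfold Spec_wordSearcher; infer_instance

-- ===== CLAIM (what is proved, stated in full; the proofs are below) =====
def Claim_equal_wordSearcher : Prop := ∀ (word : String) (url : String), Dom_wordSearcher word url → Pre_wordSearcher word url → Spec_wordSearcher word url (wordSearcher word url)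

-- ===== LEMMAS AND PROOFS =====

-- contribution of index i in A's loop, with d = len(word) - 1 (word nonempty)
def pvG (u : List Char) (d : Nat) (f l : Char) (i : Nat) : Int :=
  if u.getD i ' ' = f then
    (if i + d + 1 ≤ u.length then (if u.getD (i + d) ' ' = l then 1 else 0) else 0)
  else 0

theorem pvABody_step (w u : List Char) (f l : Char) (d : Nat) (hw : w.length = d + 1)
    (c : Int) (k : Nat) (ch : Char) :
    pvABody w u f l (c, (k : Int)) ch = (c + pvG u d f l k, ((k + 1 : Nat) : Int)) := by
  simp only [pvABody]
  have e1 : (k : Int) + (PySem.List.len w - 1) = ((k + d : Nat) : Int) := by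
    rw [PySem.List.len_eq, hw]; push_cast; ring
  rw [e1, PySem.List.pyGetD_natCast, PySem.List.pyGetD_natCast]
  have e2 : (((k + d : Nat) : Int) ≤ PySem.List.len u - 1) ↔ (k + d + 1 ≤ u.length) := by
    rw [PySem.List.len_eq]; omega
  simp only [e2, pvG, Prod.mk.injEq]
  constructor
  · split_ifs <;> ring
  · push_cast; ring

theorem pvALoop (w u : List Char) (f l : Char) (d : Nat) (hw : w.length = d + 1) :
    ∀ (v : List Char) (c : Int) (k : Nat),
      (v.foldl (pvABody w u f l) (c, (k : Int))).1
        = c + ((List.range v.length).map (fun j => pvG u d f l (k + j))).sum := by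
  intro v
  induction v with
  | nil => intro c k; simp
  | cons a v ih =>
      intro c k
      rw [List.foldl_cons, pvABody_step w u f l d hw c k a, ih (c + pvG u d f l k) (k + 1)]
      rw [List.length_cons, List.range_succ_eq_map]
      simp only [List.map_cons, List.map_map, List.sum_cons, Nat.add_zero, Function.comp_def]
      have : ∀ j : Nat, pvG u d f l (k + 1 + j) = pvG u d f l (k + Nat.succ j) := by
        intro j; congr 1; omega
      simp only [this]
      ring

-- enumerate over indices: B's comprehensions as filterMaps over List.range
theorem pvEnum (u : List Char) :
    PySem.List.enumerate u = (List.range u.length).map (fun (k : Nat) => ((k : Int), u.getD k ' ')) := by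
  rw [PySem.List.enumerate_eq_map_pyRange u ' ', PySem.List.len_eq, PySem.List.pyRange_zero_natCast,
    List.map_map]
  refine List.map_congr_left ?_
  intro k hk
  simp [PySem.List.pyGetD_natCast]

-- ===== VERDICT (by name: the statement is the Claim_ definition above) =====
theorem wordSearcher_spec : Claim_equal_wordSearcher := by
  intro word url _ hpre
  unfold Pre_wordSearcher at hpre
  unfold Spec_wordSearcher wordSearcher wordSearcher_alt
  simp only []
  obtain ⟨d, hw⟩ : ∃ d, word.toList.length = d + 1 :=
    ⟨word.toList.length - 1, by have := List.length_pos_iff.mpr hpre; omega⟩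
  have hd : d < word.toList.length := by omega
  have hlen1 : PySem.List.len word.toList - 1 = ((d : Nat) : Int) := by
    rw [PySem.List.len_eq, hw]; push_cast; ring
  have hf : PySem.List.pyGet? word.toList 0 = some (word.toList.getD 0 ' ') := by
    rw [PySem.List.pyGet?_zero, List.getD_eq_getElem word.toList ' ' (by omega),
      List.getElem?_eq_getElem (by omega)]
  have hlA : PySem.List.pyGet? word.toList (PySem.List.len word.toList - 1)
      = some (word.toList.getD d ' ') := by
    rw [hlen1, PySem.List.pyGet?_natCast, List.getD_eq_getElem word.toList ' ' hd,
      List.getElem?_eq_getElem hd]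
  have hlB : PySem.List.pyGet? word.toList (-1) = some (word.toList.getD d ' ') := by
    rw [PySem.List.pyGet?_neg_one, List.getLast?_eq_getElem?,
      show word.toList.length - 1 = d from by omega, List.getElem?_eq_getElem hd,
      List.getD_eq_getElem word.toList ' ' hd]
  rw [hf, hlA, hlB, hlen1]
  dsimp only
  set u := url.toList with hu
  set f := word.toList.getD 0 ' ' with hfc
  set l := word.toList.getD d ' ' with hlc
  set n := u.length with hn
  -- A side: the loop is the indexed sum of pvG over range n
  have hA : (u.foldl (pvABody word.toList u f l) (0, 0)).1
      = ((List.range n).map (fun j => pvG u d f l j)).sum := by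
    have := pvALoop word.toList u f l d hw u 0 0
    simpa using this
  rw [hA]
  -- A's sum as a countP over range n
  have hAcount : ((List.range n).map (fun j => pvG u d f l j)).sum
      = ((List.range n).countP
          (fun j => decide (u.getD j ' ' = f ∧ j + d + 1 ≤ n ∧ u.getD (j + d) ' ' = l)) : Int) := by
    rw [← PySem.List.sum_map_ite_one_zero]
    refine congrArg List.sum (List.map_congr_left ?_)
    intro j hj
    simp only [pvG, decide_eq_true_eq]
    split_ifs <;> first | rfl | tauto
  rw [hAcount]
  -- B side: the two set comprehensions as filterMaps over range n
  rw [pvEnum u, List.filterMap_map, List.filterMap_map]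
  set L1 := (List.range n).filterMap
      ((fun p : Int × Char => if p.2 = f then some (p.1 + (d : Int)) else none)
        ∘ fun (k : Nat) => ((k : Int), u.getD k ' ')) with hL1
  set L2 := (List.range n).filterMap
      ((fun p : Int × Char => if p.2 = l then some p.1 else none)
        ∘ fun (k : Nat) => ((k : Int), u.getD k ' ')) with hL2
  -- L1 is already duplicate-free
  have hL1nodup : L1.Nodup := by
    refine List.Nodup.filterMap ?_ (List.nodup_range)
    intro a a' b hb hb'
    simp only [Function.comp] at hb hb'
    split_ifs at hb hb' <;> simp_all
    omega
  have hL2mem : ∀ x : Int, x ∈ L2 ↔ ∃ k : Nat, k < n ∧ u.getD k ' ' = l ∧ x = (k : Int) := by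
    intro x
    simp only [hL2, List.mem_filterMap, Function.comp, List.mem_range]
    constructor
    · rintro ⟨k, hk, hx⟩
      split_ifs at hx with h
      · exact ⟨k, hk, h, by injection hx with h'; omega⟩
    · rintro ⟨k, hk, hkl, rfl⟩
      exact ⟨k, hk, by rw [if_pos hkl]⟩
  rw [PySem.Set.ofList_eq_self_of_nodup L1 hL1nodup]
  -- intersection is a filter of L1; its length is a countP
  have hlen : PySem.Set.len (PySem.Set.inter L1 (PySem.Set.ofList L2))
      = ((L1.countP (fun x => (PySem.Set.ofList L2).contains x) : Nat) : Int) := by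
    simp only [PySem.Set.inter, PySem.Set.len, ← List.countP_eq_length_filter]
  rw [hlen, hL1, List.countP_filterMap]
  congr 1
  refine List.countP_congr ?_
  intro k hk
  have hkn : k < n := List.mem_range.mp hk
  have hmem : ((k : Int) + (d : Int)) ∈ PySem.Set.ofList L2
      ↔ (k + d + 1 ≤ n ∧ u.getD (k + d) ' ' = l) := by
    rw [PySem.Set.mem_ofList, hL2mem]
    constructor
    · rintro ⟨k', hk', hl', he⟩
      have : k' = k + d := by omega
      subst this
      exact ⟨by omega, hl'⟩
    · rintro ⟨hb, hl'⟩
      exact ⟨k + d, by omega, hl', by push_cast; ring⟩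
  simp only [Function.comp, decide_eq_true_eq]
  by_cases h1 : u.getD k ' ' = f
  · rw [if_pos h1, Option.map_some, Option.getD_some, PySem.Set.contains_iff, hmem]
    tauto
  · rw [if_neg h1, Option.map_none, Option.getD_none]
    constructor
    · rintro ⟨ha, -⟩; exact absurd ha h1
    · intro h; cases h
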